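-- pv_equiv track=rewrite | github.com/alejandrogriveiro/final_sistema_turnos | configuracion.py | generar_horarios
-- ===== SOURCE A (Python) =====
-- def generar_horarios(hora_inicio, hora_fin, intervalo):
--     horarios = []
--     hora = hora_inicio
--     minutos = 0
--     while hora < hora_fin:
--         horarios.append(f"{hora:02d}:{minutos:02d}")
--         minutos += intervalo
--         if minutos >= 60:
--             hora += 1
--             minutos = 0
--     return horarios
-- ===== SOURCE B (Python) =====
-- def generar_horarios(hora_inicio, hora_fin, intervalo):
--     # Two nested ranges instead of one flat loop with a carry/reset branch:
--     # within each hour the minutes restart at 0 and step by `intervalo` while < 60,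
--     # which is exactly what A's `if minutos >= 60: reset` loop produces.
--     return [f"{h:02d}:{m:02d}"
--             for h in range(hora_inicio, hora_fin)
--             for m in range(0, 60, intervalo)]
-- ===== Notes on version B (the rewrite author's own statement) =====
-- stated objective: simpler
-- what changed: Replaces A's flat while-loop with mutable hour/minute state and an explicit carry/reset branch by a single nested comprehension over range(hora_inicio, hora_fin) and range(0, 60, intervalo).
import Mathlib
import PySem

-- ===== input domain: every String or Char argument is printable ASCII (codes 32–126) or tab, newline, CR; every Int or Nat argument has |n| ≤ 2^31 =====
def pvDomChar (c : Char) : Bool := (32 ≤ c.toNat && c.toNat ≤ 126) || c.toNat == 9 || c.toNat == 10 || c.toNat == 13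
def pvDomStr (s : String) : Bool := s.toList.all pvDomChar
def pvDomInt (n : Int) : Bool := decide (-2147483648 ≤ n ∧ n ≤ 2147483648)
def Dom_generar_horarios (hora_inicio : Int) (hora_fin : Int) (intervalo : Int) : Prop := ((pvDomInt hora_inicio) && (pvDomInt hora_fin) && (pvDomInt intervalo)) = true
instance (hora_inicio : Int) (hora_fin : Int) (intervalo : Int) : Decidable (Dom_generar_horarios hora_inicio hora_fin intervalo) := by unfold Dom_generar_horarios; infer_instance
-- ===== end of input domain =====

-- B replaces A's flat while-loop with a carry/reset branch by a nested comprehension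
-- over range(hora_inicio, hora_fin) × range(0, 60, intervalo)  (objective: simpler).

-- f"{n:02d}" — for width 2 this is str(n) zero-padded on the left, sign kept in front (= str(n).zfill(2))
def pvEntry (h : Int) (m : Int) : String :=
  PySem.Str.zfill (PySem.Int.toStr h) 2 ++ ":" ++ PySem.Str.zfill (PySem.Int.toStr m) 2

-- ===== PORT A =====
-- A's while loop; the hypothesis 1 ≤ intervalo only makes the recursion total (Python diverges otherwise)
def pvLoopA (hora_fin intervalo : Int) (hi : 1 ≤ intervalo) (hora minutos : Int) : List String :=
  if _h : hora < hora_fin then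
    if 60 ≤ minutos + intervalo then
      pvEntry hora minutos :: pvLoopA hora_fin intervalo hi (hora + 1) 0
    else
      pvEntry hora minutos :: pvLoopA hora_fin intervalo hi hora (minutos + intervalo)
  else []
termination_by ((hora_fin - hora).toNat * 61 + (60 - minutos).toNat)
decreasing_by
  · omega
  · omega

def generar_horarios (hora_inicio : Int) (hora_fin : Int) (intervalo : Int) : List String :=
  if hi : 1 ≤ intervalo then pvLoopA hora_fin intervalo hi hora_inicio 0
  else []  -- totality guard: with intervalo ≤ 0 Python's loop either never runs (returns []) or never terminates

-- ===== PORT B =====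
def generar_horarios_alt (hora_inicio : Int) (hora_fin : Int) (intervalo : Int) : List String :=
  (PySem.List.pyRange hora_inicio hora_fin 1).flatMap
    (fun h => (PySem.List.pyRange 0 60 intervalo).map (fun m => pvEntry h m))

-- ===== PRECONDITION & SPEC =====
-- Pre_ excludes exactly the inputs where A never returns: intervalo ≤ 0 together with
-- hora_inicio < hora_fin makes A's while loop run forever (minutos never reaches 60).
def Pre_generar_horarios (hora_inicio : Int) (hora_fin : Int) (intervalo : Int) : Prop :=
  1 ≤ intervalo ∨ hora_fin ≤ hora_inicio
instance (hora_inicio : Int) (hora_fin : Int) (intervalo : Int) : Decidable (Pre_generar_horarios hora_inicio hora_fin intervalo) := by unfold Pre_generar_horarios; infer_instance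

def pvWitness_generar_horarios : Int × Int × Int := (8, 11, 20)

def Spec_generar_horarios (hora_inicio : Int) (hora_fin : Int) (intervalo : Int) (out : List String) : Prop := out = generar_horarios_alt hora_inicio hora_fin intervalo
instance (hora_inicio : Int) (hora_fin : Int) (intervalo : Int) (out : List String) : Decidable (Spec_generar_horarios hora_inicio hora_fin intervalo out) := by unfold Spec_generar_horarios; infer_instance

-- ===== CLAIM (what is proved, stated in full; the proofs are below) =====
def Claim_equal_generar_horarios : Prop := ∀ (hora_inicio : Int) (hora_fin : Int) (intervalo : Int), Dom_generar_horarios hora_inicio hora_fin intervalo → Pre_generar_horarios hora_inicio hora_fin intervalo → Spec_generar_horarios hora_inicio hora_fin intervalo (generar_horarios hora_inicio hora_fin intervalo)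

-- ===== LEMMAS AND PROOFS =====

-- range(a, b, s) with 0 < s is empty when b ≤ a …
lemma pvRange_pos_nil (a b s : Int) (hs : 0 < s) (h : b ≤ a) :
    PySem.List.pyRange a b s = [] := by
  rw [PySem.List.pyRange_of_pos a b hs, if_neg (not_lt.2 h)]
  simp

-- … and starts with a, stepping to a + s, when a < b
lemma pvRange_pos_cons (a b s : Int) (hs : 0 < s) (h : a < b) :
    PySem.List.pyRange a b s = a :: PySem.List.pyRange (a + s) b s := by
  rw [PySem.List.pyRange_of_pos a b hs, PySem.List.pyRange_of_pos (a + s) b hs,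
      if_pos h]
  by_cases h2 : a + s < b
  · rw [if_pos h2]
    have hcnt : ((b - a + s - 1) / s).toNat = ((b - (a + s) + s - 1) / s).toNat + 1 := by
      have : b - a + s - 1 = (b - (a + s) + s - 1) + 1 * s := by ring
      rw [this, Int.add_mul_ediv_right _ _ (by omega : s ≠ 0)]
      have h0 : 0 ≤ (b - (a + s) + s - 1) / s := Int.ediv_nonneg (by omega) (by omega)
      omega
    rw [hcnt, List.range_succ_eq_map]
    simp only [List.map_cons, List.map_map]
    congr 1
    · simp
    · exact List.map_congr_left (fun k _ => by simp [Function.comp]; ring)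
  · rw [if_neg h2]
    have hcnt : ((b - a + s - 1) / s).toNat = 1 := by
      have h1 : (b - a + s - 1) / s = 1 := by
        rw [← PySem.Int.floordiv_eq_ediv_of_pos hs,
            PySem.Int.floordiv_eq_iff_of_pos hs]
        omega
      omega
    rw [hcnt]
    simp

-- inner loop: one hour's worth of A's iterations produces one row of B's table
lemma pvLoopA_inner (hora_fin intervalo : Int) (hi : 1 ≤ intervalo) (hora : Int)
    (hh : hora < hora_fin) :
    ∀ (n : Nat) (m : Int), (60 - m).toNat ≤ n → 0 ≤ m → m < 60 →
      pvLoopA hora_fin intervalo hi hora m =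
        ((PySem.List.pyRange m 60 intervalo).map (fun m' => pvEntry hora m')) ++
          pvLoopA hora_fin intervalo hi (hora + 1) 0 := by
  intro n
  induction n with
  | zero => intro m hn h0 h60; omega
  | succ n ih =>
    intro m hn h0 h60
    rw [pvLoopA, dif_pos hh, pvRange_pos_cons m 60 intervalo (by omega) h60]
    by_cases hb : 60 ≤ m + intervalo
    · rw [if_pos hb, pvRange_pos_nil (m + intervalo) 60 intervalo (by omega) hb]
      simp
    · rw [if_neg hb, ih (m + intervalo) (by omega) (by omega) (by omega)]
      simp

-- outer loop: A's loop over hours is B's flatMap over range(hora_inicio, hora_fin)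
lemma pvLoopA_outer (hora_fin intervalo : Int) (hi : 1 ≤ intervalo) :
    ∀ (n : Nat) (hora : Int), (hora_fin - hora).toNat ≤ n →
      pvLoopA hora_fin intervalo hi hora 0 =
        (PySem.List.pyRange hora hora_fin 1).flatMap
          (fun h => (PySem.List.pyRange 0 60 intervalo).map (fun m => pvEntry h m)) := by
  intro n
  induction n with
  | zero =>
    intro hora hn
    rw [pvLoopA, dif_neg (by omega), PySem.List.pyRange_one_eq_nil (by omega)]
    simp
  | succ n ih =>
    intro hora hn
    by_cases hh : hora < hora_fin
    · rw [pvLoopA_inner hora_fin intervalo hi hora hh 60 0 (by omega) le_rfl (by omega),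
          ih (hora + 1) (by omega),
          PySem.List.pyRange_one_cons hh]
      simp
    · rw [pvLoopA, dif_neg hh, PySem.List.pyRange_one_eq_nil (by omega)]
      simp

-- ===== VERDICT (by name: the statement is the Claim_ definition above) =====
theorem generar_horarios_spec : Claim_equal_generar_horarios := by
  intro h0 hf i _ hpre
  unfold Spec_generar_horarios generar_horarios generar_horarios_alt
  by_cases hi : 1 ≤ i
  · rw [dif_pos hi]
    exact pvLoopA_outer hf i hi (hf - h0).toNat h0 le_rfl
  · rw [dif_neg hi]
    have hle : hf ≤ h0 := hpre.resolve_left hi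
    rw [PySem.List.pyRange_one_eq_nil hle]
    simp
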